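-- pv_equiv track=rewrite | github.com/combikms/PS_BOJ | 그리디알고리즘/1339.py | Calc
-- ===== SOURCE A (Python) =====
-- def Calc(words):
--     value = {}
--
--     for word in words:
--         length = len(word)
--         for i, char in enumerate(word):
--             power = length - i - 1
--             if char in value:
--                 value[char] += 10 ** power
--             else:
--                 value[char] = 10 ** power
--
--     sorted_chars = sorted(value.items(), key=lambda x: x[1], reverse=True)
--
--     num = 9
--     char_to_num = {}
--     for char, _ in sorted_chars:
--         char_to_num[char] = num
--         num -= 1
--
--     sum = 0
--     for word in words:
--         cur = 0
--         for char in word: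
--             cur = cur * 10 + char_to_num[char]
--         sum += cur
--
--     return sum
-- ===== SOURCE B (Python) =====
-- def Calc(words):
--     value = {}
--     for word in words:
--         length = len(word)
--         for i, char in enumerate(word):
--             value[char] = value.get(char, 0) + 10 ** (length - i - 1)
--     total = 0
--     num = 9
--     for _, w in sorted(value.items(), key=lambda x: x[1], reverse=True):
--         total += w * num
--         num -= 1
--     return total
-- ===== Notes on version B (the rewrite author's own statement) =====
-- stated objective: simpler
-- what changed: B keeps the per-character weighting and the same reverse sort, but drops A's digit-assignment dict and the whole nested word-reconstruction pass: the answer is accumulated as total += weight * digit in the single pass that walks the sorted weights.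
import Mathlib
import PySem

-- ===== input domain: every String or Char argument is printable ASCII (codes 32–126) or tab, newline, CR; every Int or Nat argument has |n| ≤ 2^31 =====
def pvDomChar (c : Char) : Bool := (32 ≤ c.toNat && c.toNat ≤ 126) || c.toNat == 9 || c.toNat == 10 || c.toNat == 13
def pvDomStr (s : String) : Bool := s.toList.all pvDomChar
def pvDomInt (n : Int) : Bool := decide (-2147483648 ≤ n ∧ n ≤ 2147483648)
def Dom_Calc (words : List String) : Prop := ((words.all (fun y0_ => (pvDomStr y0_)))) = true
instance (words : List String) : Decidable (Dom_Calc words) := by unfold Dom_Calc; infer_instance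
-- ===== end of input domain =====

-- B drops A's digit-assignment dict and the nested word-reconstruction pass, accumulating
-- total += weight * digit in the single pass over the sorted weights (objective: simpler).

-- ===== PORT A =====
-- '10 ** power' is ported as '(10:Int) ^ power.toNat': exact, since power = length - i - 1 ≥ 0 here.
-- 'char_to_num[char]' is ported as getD _ 0: every char of every word is a key of char_to_num.
def Calc (words : List String) : Int :=
  let value : PySem.Dict Char Int := words.foldl (fun value word =>
    let length : Int := ((word.toList.length : Nat) : Int)
    (PySem.List.enumerate word.toList 0).foldl (fun value p =>
      let power : Int := length - p.1 - 1
      if value.contains p.2 then value.insert p.2 (value.getD p.2 0 + (10:Int) ^ power.toNat)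
      else value.insert p.2 ((10:Int) ^ power.toNat)) value) PySem.Dict.empty
  let sorted_chars := PySem.List.sorted value.items (fun x => x.2) true
  let char_to_num : PySem.Dict Char Int :=
    (sorted_chars.foldl (fun (st : Int × PySem.Dict Char Int) p =>
      (st.1 - 1, st.2.insert p.1 st.1)) (9, PySem.Dict.empty)).2
  words.foldl (fun sum word =>
    sum + word.toList.foldl (fun cur ch => cur * 10 + char_to_num.getD ch 0) 0) 0

-- ===== PORT B =====
def Calc_alt (words : List String) : Int :=
  let value : PySem.Dict Char Int := words.foldl (fun value word =>
    let length : Int := ((word.toList.length : Nat) : Int)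
    (PySem.List.enumerate word.toList 0).foldl (fun value p =>
      value.insert p.2 (value.getD p.2 0 + (10:Int) ^ ((length - p.1 - 1).toNat))) value)
    PySem.Dict.empty
  ((PySem.List.sorted value.items (fun x => x.2) true).foldl
    (fun (st : Int × Int) p => (st.1 + p.2 * st.2, st.2 - 1)) (0, 9)).1

-- ===== PRECONDITION & SPEC =====
def Spec_Calc (words : List String) (out : Int) : Prop := out = Calc_alt words
instance (words : List String) (out : Int) : Decidable (Spec_Calc words out) := by unfold Spec_Calc; infer_instance

-- ===== CLAIM (what is proved, stated in full; the proofs are below) =====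
def Claim_equal_Calc : Prop := ∀ (words : List String), Dom_Calc words → Spec_Calc words (Calc words)

-- ===== LEMMAS AND PROOFS =====

-- weighted sum of an association list under a digit assignment f
def pvWsum (f : Char → Int) (l : List (Char × Int)) : Int :=
  (l.map (fun p => f p.1 * p.2)).sum

-- the branch-free weight-accumulating fold
def pvBuildW (d : PySem.Dict Char Int) (l : List (Char × Int)) : PySem.Dict Char Int :=
  l.foldl (fun d q => d.insert q.1 (d.getD q.1 0 + q.2)) d

-- the (char, 10^(len-i-1)) contribution pairs of one word
def pvPairs (cs : List Char) : List (Char × Int) :=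
  (PySem.List.enumerate cs 0).map
    (fun p => (p.2, (10:Int) ^ ((((cs.length : Nat) : Int) - p.1 - 1).toNat)))

-- A's digit-assignment fold and B's fused accumulating fold
def pvCtnFold (S : List (Char × Int)) (st : Int × PySem.Dict Char Int) : Int × PySem.Dict Char Int :=
  S.foldl (fun st p => (st.1 - 1, st.2.insert p.1 st.1)) st

def pvBFold (S : List (Char × Int)) (st : Int × Int) : Int × Int :=
  S.foldl (fun st p => (st.1 + p.2 * st.2, st.2 - 1)) st

theorem pvWsum_nil (f : Char → Int) : pvWsum f [] = 0 := rfl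
theorem pvWsum_cons (f : Char → Int) (q : Char × Int) (l : List (Char × Int)) :
    pvWsum f (q :: l) = f q.1 * q.2 + pvWsum f l := by simp [pvWsum]
theorem pvWsum_append (f : Char → Int) (l1 l2 : List (Char × Int)) :
    pvWsum f (l1 ++ l2) = pvWsum f l1 + pvWsum f l2 := by simp [pvWsum]

theorem pvBuildW_append (d : PySem.Dict Char Int) (l1 l2 : List (Char × Int)) :
    pvBuildW d (l1 ++ l2) = pvBuildW (pvBuildW d l1) l2 := by
  simp [pvBuildW, List.foldl_append]

theorem pv_enumerate_shift {α : Type} (xs : List α) (s : Int) :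
    PySem.List.enumerate xs (s + 1) = (PySem.List.enumerate xs s).map (fun p => (p.1 + 1, p.2)) := by
  induction xs generalizing s with
  | nil => simp [PySem.List.enumerate_nil]
  | cons x xs ih => simp [PySem.List.enumerate_cons, ih (s + 1)]

theorem pvPairs_nil : pvPairs [] = [] := rfl

theorem pvPairs_cons (c : Char) (cs : List Char) :
    pvPairs (c :: cs) = (c, (10:Int) ^ cs.length) :: pvPairs cs := by
  simp only [pvPairs, PySem.List.enumerate_cons, List.map_cons]
  refine List.cons_eq_cons.mpr ⟨?_, ?_⟩
  · simp
  · rw [pv_enumerate_shift]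
    simp only [List.map_map]
    apply List.map_congr_left
    intro p _
    simp only [Function.comp]
    congr 2
    simp only [List.length_cons]
    congr 1
    push_cast
    ring

-- horner evaluation of a word = weighted positional sum
theorem pv_horner (g : Char → Int) (cs : List Char) (cur : Int) :
    cs.foldl (fun cur ch => cur * 10 + g ch) cur
      = cur * (10:Int) ^ cs.length + pvWsum g (pvPairs cs) := by
  induction cs generalizing cur with
  | nil => simp [pvPairs_nil, pvWsum_nil]
  | cons c cs ih =>
    simp only [List.foldl_cons, pvPairs_cons, pvWsum_cons, List.length_cons]
    rw [ih]
    ring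

-- one overwrite at a unique key shifts the weighted sum by f c * x
theorem pvWsum_overwrite (f : Char → Int) (c : Char) (w0 x : Int) :
    ∀ (l : List (Char × Int)), (l.map Prod.fst).Nodup → (c, w0) ∈ l →
      pvWsum f (l.map (fun p => if p.1 == c then (c, w0 + x) else p)) = pvWsum f l + f c * x := by
  intro l
  induction l with
  | nil => simp
  | cons q l ih =>
    intro hnd hmem
    simp only [List.map_cons, List.nodup_cons] at hnd
    rcases List.mem_cons.mp hmem with h | h
    · subst h
      simp only [List.map_cons, beq_self_eq_true, if_pos]
      have htail : l.map (fun p => if p.1 == c then (c, w0 + x) else p) = l := by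
        rw [show l = l.map id by simp]
        simp only [List.map_map]
        apply List.map_congr_left
        intro p hp
        have : p.1 ≠ c := by
          intro hpc
          have hm : p.1 ∈ l.map Prod.fst := List.mem_map_of_mem hp
          exact hnd.1 (hpc ▸ hm)
        simp [this]
      rw [htail, pvWsum_cons, pvWsum_cons]
      simp only
      ring
    · have hq1 : q.1 ≠ c := by
        intro hqc
        have hm : c ∈ l.map Prod.fst := List.mem_map_of_mem (f := Prod.fst) h
        exact hnd.1 (hqc ▸ hm)
      simp only [List.map_cons, beq_iff_eq, if_neg hq1, pvWsum_cons]
      have := ih hnd.2 h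
      simp only [beq_iff_eq] at this
      rw [this]
      ring

-- inserting (getD + x) at key c shifts the weighted item sum by f c * x
theorem pvWsum_items_insert (f : Char → Int) (d : PySem.Dict Char Int) (c : Char) (x : Int)
    (hnd : d.keys.Nodup) :
    pvWsum f (d.insert c (d.getD c 0 + x)).items = pvWsum f d.items + f c * x := by
  by_cases h : d.contains c = true
  · rw [PySem.Dict.items_insert_of_contains d _ h]
    have hs : (d.get? c).isSome := by
      rw [← PySem.Dict.contains_eq_isSome_get? d c]; exact h
    rcases Option.isSome_iff_exists.mp hs with ⟨w0, hw⟩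
    have hmem : (c, w0) ∈ d.items := PySem.Dict.mem_items_of_get?_eq_some d hw
    have hgd : d.getD c 0 = w0 := PySem.Dict.getD_of_get?_eq_some d 0 hw
    have hkeys : (d.items.map Prod.fst).Nodup := by
      have : d.keys = d.items.map Prod.fst := by simp [PySem.Dict.keys]
      rwa [this] at hnd
    rw [hgd]
    exact pvWsum_overwrite f c w0 x d.items hkeys hmem
  · rw [PySem.Dict.items_insert_of_not_contains d _ (by simpa using h)]
    rw [pvWsum_append]
    have : d.getD c 0 = 0 := PySem.Dict.getD_of_not_contains d 0 (by simpa using h)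
    rw [this]
    simp [pvWsum]

-- MAIN: accumulating a contribution list into the dict adds its weighted sum to the items' sum
theorem pvBuildW_wsum (f : Char → Int) :
    ∀ (l : List (Char × Int)) (d : PySem.Dict Char Int), d.keys.Nodup →
      pvWsum f (pvBuildW d l).items = pvWsum f d.items + pvWsum f l := by
  intro l
  induction l with
  | nil => intro d _; simp [pvBuildW, pvWsum_nil]
  | cons q l ih =>
    intro d hnd
    have hstep : pvBuildW d (q :: l) = pvBuildW (d.insert q.1 (d.getD q.1 0 + q.2)) l := rfl
    rw [hstep, ih _ (PySem.Dict.nodup_keys_insert d q.1 _ hnd),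
        pvWsum_items_insert f d q.1 q.2 hnd, pvWsum_cons]
    ring

-- later fresh inserts do not change a lookup
theorem pvCtnFold_get?_of_not_mem (c : Char) :
    ∀ (S : List (Char × Int)) (st : Int × PySem.Dict Char Int), (∀ p ∈ S, p.1 ≠ c) →
      (pvCtnFold S st).2.get? c = st.2.get? c := by
  intro S
  induction S with
  | nil => intro st _; rfl
  | cons q S ih =>
    intro st h
    have hstep : pvCtnFold (q :: S) st = pvCtnFold S (st.1 - 1, st.2.insert q.1 st.1) := rfl
    rw [hstep, ih _ (fun p hp => h p (List.mem_cons_of_mem _ hp))]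
    exact PySem.Dict.get?_insert_of_ne st.2 st.1 (fun hc => h q (List.mem_cons_self ..) hc.symm)

-- B's fused fold computes the weighted sum under A's digit assignment
theorem pvBFold_eq_wsum :
    ∀ (S : List (Char × Int)), (S.map Prod.fst).Nodup →
      ∀ (n t : Int) (d : PySem.Dict Char Int),
        (pvBFold S (t, n)).1 = t + pvWsum (fun c => ((pvCtnFold S (n, d)).2.getD c 0)) S := by
  intro S
  induction S with
  | nil => intro _ n t d; simp [pvBFold, pvWsum_nil]
  | cons q S ih =>
    intro hnd n t d
    simp only [List.map_cons, List.nodup_cons] at hnd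
    have hb : pvBFold (q :: S) (t, n) = pvBFold S (t + q.2 * n, n - 1) := rfl
    have hc : pvCtnFold (q :: S) (n, d) = pvCtnFold S (n - 1, d.insert q.1 n) := rfl
    rw [hb, hc, pvWsum_cons, ih hnd.2 (n - 1) (t + q.2 * n) (d.insert q.1 n)]
    have hq : (pvCtnFold S (n - 1, d.insert q.1 n)).2.getD q.1 0 = n := by
      rw [PySem.Dict.getD_eq_get?_getD,
          pvCtnFold_get?_of_not_mem q.1 S _
            (fun p hp hpc => hnd.1 (hpc ▸ List.mem_map_of_mem hp)),
          PySem.Dict.get?_insert_self d q.1 n]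
      rfl
    rw [hq]
    ring

-- the if/else in A's weight loop is the branch-free insert of B's
theorem pv_insert_if (d : PySem.Dict Char Int) (c : Char) (x : Int) :
    (if d.contains c then d.insert c (d.getD c 0 + x) else d.insert c x)
      = d.insert c (d.getD c 0 + x) := by
  by_cases h : d.contains c = true
  · simp [h]
  · have h' : d.contains c = false := by simpa using h
    rw [if_neg (by simp [h']), PySem.Dict.getD_of_not_contains d 0 h', zero_add]

-- one word's weight loop is pvBuildW over its contribution pairs
theorem pv_inner_eq_buildW (cs : List Char) (d : PySem.Dict Char Int) :
    (PySem.List.enumerate cs 0).foldl (fun d p =>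
        d.insert p.2 (d.getD p.2 0 + (10:Int) ^ ((((cs.length : Nat) : Int) - p.1 - 1).toNat))) d
      = pvBuildW d (pvPairs cs) := by
  rw [pvBuildW, pvPairs, List.foldl_map]

-- the whole weight phase is pvBuildW over the concatenated contribution pairs
theorem pv_value_eq_buildW :
    ∀ (words : List String) (d : PySem.Dict Char Int),
      words.foldl (fun value word =>
        (PySem.List.enumerate word.toList 0).foldl (fun value p =>
          value.insert p.2 (value.getD p.2 0 +
            (10:Int) ^ ((((word.toList.length : Nat) : Int) - p.1 - 1).toNat))) value) d
        = pvBuildW d (words.flatMap (fun w => pvPairs w.toList)) := by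
  intro words
  induction words with
  | nil => intro d; rfl
  | cons w ws ih =>
    intro d
    rw [List.foldl_cons, ih, List.flatMap_cons, pvBuildW_append]
    simp only [pv_inner_eq_buildW]

-- A's summation loop is the weighted sum over the concatenated contribution pairs
theorem pv_asum_eq_wsum (g : Char → Int) :
    ∀ (words : List String) (t : Int),
      words.foldl (fun sum word =>
          sum + word.toList.foldl (fun cur ch => cur * 10 + g ch) 0) t
        = t + pvWsum g (words.flatMap (fun w => pvPairs w.toList)) := by
  intro words
  induction words with
  | nil => intro t; simp [pvWsum_nil]
  | cons w ws ih =>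
    intro t
    rw [List.foldl_cons, ih, List.flatMap_cons, pvWsum_append, pv_horner]
    ring

-- weighted sums agree on permuted lists
theorem pvWsum_perm (f : Char → Int) {l1 l2 : List (Char × Int)} (h : l1.Perm l2) :
    pvWsum f l1 = pvWsum f l2 := by
  unfold pvWsum
  exact (h.map _).sum_eq

-- ===== VERDICT (by name: the statement is the Claim_ definition above) =====
theorem Calc_spec : Claim_equal_Calc := by
  intro words _
  unfold Spec_Calc Calc Calc_alt
  simp only [pv_insert_if]
  rw [pv_value_eq_buildW]
  set L := words.flatMap (fun w => pvPairs w.toList) with hL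
  set V := pvBuildW PySem.Dict.empty L with hV
  set S := PySem.List.sorted V.items (fun x => x.2) true with hS
  -- facts about V and S
  have hVnd : V.keys.Nodup := by
    rw [hV, pvBuildW]
    exact PySem.Dict.nodup_keys_foldl_insert_key L Prod.fst _ _ PySem.Dict.nodup_keys_empty
  have hperm : S.Perm V.items := PySem.List.sorted_perm _ _ _
  have hSnd : (S.map Prod.fst).Nodup := by
    have hk : V.keys = V.items.map Prod.fst := by simp [PySem.Dict.keys]
    exact ((hperm.map Prod.fst).nodup_iff).mpr (by rw [← hk]; exact hVnd)
  -- the digit assignment of A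
  set g : Char → Int :=
    fun c => ((pvCtnFold S (9, PySem.Dict.empty)).2.getD c 0) with hg
  -- A's side
  have hA : words.foldl (fun sum word =>
      sum + word.toList.foldl (fun cur ch =>
        cur * 10 + (pvCtnFold S (9, PySem.Dict.empty)).2.getD ch 0) 0) 0 = pvWsum g S := by
    rw [pv_asum_eq_wsum g words 0, zero_add, ← hL]
    have h1 : pvWsum g V.items = pvWsum g PySem.Dict.empty.items + pvWsum g L := by
      rw [hV]
      exact pvBuildW_wsum g L PySem.Dict.empty PySem.Dict.nodup_keys_empty
    have h2 : pvWsum g PySem.Dict.empty.items = 0 := rfl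
    rw [pvWsum_perm g hperm, h1, h2, zero_add]
  -- B's side
  have hB : ((S.foldl (fun (st : Int × Int) p => (st.1 + p.2 * st.2, st.2 - 1)) (0, 9)).1)
      = pvWsum g S := by
    have := pvBFold_eq_wsum S hSnd 9 0 PySem.Dict.empty
    rw [pvBFold] at this
    rw [this]
    ring
  -- both loops are the folds above (definitional reshaping)
  rw [hB, ← hA]
  rfl
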